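-- pv_equiv track=rewrite | github.com/Jiaxuan1/Fundamentals-of-Programming-and-Computer-Science | hw3.py | addLowerletter
-- ===== SOURCE A (Python) =====
-- def addLowerletter(s, rows):
--     blank = rows - (len(s) % rows)
--     source = "ABCDEFGHIJKLMNOPQRSTUVWXYZ"[::-1].lower()
--     for i in range(blank):
--         while i >= 26:
--             i -= 26
--         s += source[i]
--     return s
-- ===== SOURCE B (Python) =====
-- def addLowerletter(s, rows):
--     blank = rows - (len(s) % rows)
--     source = "zyxwvutsrqponmlkjihgfedcba"
--     return s + (source * (blank // 26 + 1))[:blank]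
-- ===== Notes on version B (the rewrite author's own statement) =====
-- stated objective: faster
-- what changed: Replaced the per-character loop with its modulo-by-repeated-subtraction by a single repeat-and-slice: the padding is the reversed lowercase alphabet repeated blank//26+1 times, truncated to blank characters.
import Mathlib
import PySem

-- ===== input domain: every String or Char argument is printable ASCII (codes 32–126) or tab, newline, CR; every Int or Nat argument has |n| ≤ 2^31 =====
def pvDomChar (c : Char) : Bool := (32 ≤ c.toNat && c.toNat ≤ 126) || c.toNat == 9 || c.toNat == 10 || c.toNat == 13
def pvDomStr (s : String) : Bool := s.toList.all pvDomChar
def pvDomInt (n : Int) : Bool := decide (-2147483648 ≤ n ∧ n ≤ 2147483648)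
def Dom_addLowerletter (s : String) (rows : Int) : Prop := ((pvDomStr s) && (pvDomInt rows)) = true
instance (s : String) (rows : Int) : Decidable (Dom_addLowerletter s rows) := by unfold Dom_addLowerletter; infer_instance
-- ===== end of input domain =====

-- B replaces A's per-character loop (with modulo by repeated subtraction) by one repeat-and-slice of the
-- reversed lowercase alphabet; return value only, no observable mutation.

-- ===== PORT A =====
-- the inner 'while i >= 26: i -= 26' loop of A
def reduce26 (i : Int) : Int :=
  if 26 ≤ i then reduce26 (i - 26) else i
termination_by i.toNat
decreasing_by omega

def addLowerletter (s : String) (rows : Int) : String :=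
  let blank := rows - PySem.Int.mod (PySem.Str.len s) rows
  let source := PySem.Chars.lower ((PySem.List.slice? "ABCDEFGHIJKLMNOPQRSTUVWXYZ".toList none none (-1)).getD [])
  -- source[i] can never raise here (0 ≤ reduce26 i < 26 for the nonnegative i of range), so pyGetD is exact
  String.ofList ((PySem.List.pyRange 0 blank 1).foldl
    (fun acc i => acc ++ [PySem.List.pyGetD source (reduce26 i) 'a']) s.toList)

-- ===== PORT B =====
def addLowerletter_alt (s : String) (rows : Int) : String :=
  let blank := rows - PySem.Int.mod (PySem.Str.len s) rows
  let source := "zyxwvutsrqponmlkjihgfedcba".toList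
  String.ofList (s.toList ++
    PySem.List.slice (PySem.List.pyRepeat source (PySem.Int.floordiv blank 26 + 1)) none (some blank))

-- ===== PRECONDITION & SPEC =====
-- Pre_ excludes exactly rows = 0, on which 'len(s) % rows' raises ZeroDivisionError in A (and in B).
def Pre_addLowerletter (s : String) (rows : Int) : Prop := rows ≠ 0
instance (s : String) (rows : Int) : Decidable (Pre_addLowerletter s rows) := by
  unfold Pre_addLowerletter; infer_instance

def pvWitness_addLowerletter : String × Int := ("ab", 5)

def Spec_addLowerletter (s : String) (rows : Int) (out : String) : Prop := out = addLowerletter_alt s rows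
instance (s : String) (rows : Int) (out : String) : Decidable (Spec_addLowerletter s rows out) := by
  unfold Spec_addLowerletter; infer_instance

-- ===== CLAIM (what is proved, stated in full; the proofs are below) =====
def Claim_equal_addLowerletter : Prop := ∀ (s : String) (rows : Int), Dom_addLowerletter s rows → Pre_addLowerletter s rows → Spec_addLowerletter s rows (addLowerletter s rows)

-- ===== LEMMAS AND PROOFS =====

theorem reduce26_eq (i : Int) (h : 0 ≤ i) : reduce26 i = i % 26 := by
  rw [reduce26]
  by_cases h26 : 26 ≤ i
  · rw [if_pos h26, reduce26_eq (i - 26) (by omega)]; omega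
  · rw [if_neg h26]; omega
termination_by i.toNat
decreasing_by omega

theorem getElem?_flatten_replicate {α : Type} (l : List α) (m i : Nat)
    (h : i < m * l.length) :
    ((List.replicate m l).flatten)[i]? = l[i % l.length]? := by
  induction m generalizing i with
  | zero => omega
  | succ m ih =>
    rw [List.replicate_succ, List.flatten_cons]
    by_cases hlt : i < l.length
    · rw [List.getElem?_append_left hlt, Nat.mod_eq_of_lt hlt]
    · rw [List.getElem?_append_right (Nat.le_of_not_lt hlt),
        ih (i - l.length) (by
          have : (m + 1) * l.length = m * l.length + l.length := by ring
          omega)]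
      congr 1
      conv_rhs => rw [show i = (i - l.length) + 1 * l.length by omega]
      rw [Nat.add_mul_mod_self_right]

theorem pad_eq {α : Type} (l : List α) (n m : Nat) (hl : 0 < l.length) (hnm : n ≤ m * l.length)
    (d : α) :
    (List.range n).map (fun k => l.getD (k % l.length) d)
      = ((List.replicate m l).flatten).take n := by
  have hflat : ((List.replicate m l).flatten).length = m * l.length := by
    simp [List.length_flatten, List.map_replicate]
  apply List.ext_getElem
  · simp [hflat]; omega
  · intro i h1 h2
    simp only [List.getElem_map, List.getElem_range, List.getElem_take]
    have hi : i < n := by simpa using h1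
    have hmod : i % l.length < l.length := Nat.mod_lt _ hl
    have h3 := getElem?_flatten_replicate l m i (by omega)
    rw [List.getElem?_eq_getElem (by omega), List.getElem?_eq_getElem hmod] at h3
    rw [List.getD_eq_getElem l d hmod, Option.some.inj h3]

theorem source_eq :
    PySem.Chars.lower ((PySem.List.slice? "ABCDEFGHIJKLMNOPQRSTUVWXYZ".toList none none (-1)).getD [])
      = "zyxwvutsrqponmlkjihgfedcba".toList := by decide

-- ===== VERDICT =====
theorem addLowerletter_spec : Claim_equal_addLowerletter := by
  intro s rows _hdom hpre
  unfold Spec_addLowerletter addLowerletter addLowerletter_alt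
  simp only [source_eq]
  set src : List Char := "zyxwvutsrqponmlkjihgfedcba".toList with hsrc
  have hsrclen : src.length = 26 := by decide
  set blank : Int := rows - PySem.Int.mod (PySem.Str.len s) rows with hblank
  rw [PySem.List.foldl_append_singleton_eq_map]
  congr 1
  apply congrArg
  by_cases hb : blank ≤ 0
  · -- empty range; and the repeat count is ≤ 0 (or the slice takes 0), so both sides are []
    rw [PySem.List.pyRange_one_eq_nil hb, List.map_nil]
    rcases lt_or_eq_of_le hb with hlt | heq
    · have hq : PySem.Int.floordiv blank 26 + 1 ≤ 0 := by
        have h1 : PySem.Int.floordiv blank 26 ≤ -1 := by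
          have := PySem.Int.floordiv_mul_add_mod blank 26
          have hm := PySem.Int.mod_nonneg blank (b := 26) (by omega)
          have hm2 := PySem.Int.mod_lt blank (b := 26) (by omega)
          nlinarith [PySem.Int.floordiv blank 26]
        omega
      have : PySem.List.pyRepeat src (PySem.Int.floordiv blank 26 + 1) = [] := by
        unfold PySem.List.pyRepeat
        rw [Int.toNat_of_nonpos hq]
        simp
      rw [this]
      simp [PySem.List.slice]
    · rw [heq]
      have hs := PySem.List.slice_to (xs := PySem.List.pyRepeat src (PySem.Int.floordiv (0:Int) 26 + 1)) (b := (0:Int)) le_rfl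
      rw [hs]
      simp
  · rw [not_le] at hb
    have h26 : (0:Int) < 26 := by omega
    set m : Int := PySem.Int.floordiv blank 26 + 1 with hm
    have hfd : PySem.Int.floordiv blank 26 = blank / 26 :=
      PySem.Int.floordiv_eq_ediv_of_pos h26
    have hm0 : 0 < m := by rw [hm, hfd]; omega
    have hbound : blank ≤ m * 26 := by rw [hm, hfd]; omega
    have hs := PySem.List.slice_to (xs := PySem.List.pyRepeat src m) (b := blank) (by omega)
    rw [hs]
    rw [PySem.List.pyRange_one, sub_zero]
    unfold PySem.List.pyRepeat
    have := pad_eq src blank.toNat m.toNat (by rw [hsrclen]; omega) (by rw [hsrclen]; omega) 'a'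
    rw [hsrclen] at this
    rw [← this]
    rw [List.map_map]
    apply List.map_congr_left
    intro k _hk
    simp only [Function.comp_apply]
    rw [show (0:Int) + (k:Int) = (k:Int) by ring]
    rw [reduce26_eq (k:Int) (by omega)]
    have hmodcast : ((k:Int) % 26) = ((k % 26 : Nat) : Int) := by omega
    rw [hmodcast, PySem.List.pyGetD_natCast]
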